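-- pv_equiv track=rewrite | github.com/ThuongLuu2603/OTA-Sraper | agoda-scraper/market_db.py | _pick_base_source
-- ===== SOURCE A (Python) =====
-- def _pick_base_source(available: list[str], by_source: dict[str, list]) -> str:
--     """Nguồn có nhiều bản ghi nhất làm trục so sánh; hòa thì ưu tiên thứ tự (tránh mặc định Agoda)."""
--     best_n = max(len(by_source[s]) for s in available)
--     cand = [s for s in available if len(by_source[s]) == best_n]
--     tie_pref = ["Travel.com.vn", "Trip.com", "Mytour.vn", "iVIVU", "Agoda"]
--     for o in tie_pref:
--         if o in cand:
--             return o
--     return cand[0]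
-- ===== SOURCE B (Python) =====
-- def _pick_base_source(available: list[str], by_source: dict[str, list]) -> str:
--     """Single-pass selection: lexicographic key (record count, preference rank)."""
--     pref = {"Travel.com.vn": 4, "Trip.com": 3, "Mytour.vn": 2, "iVIVU": 1, "Agoda": 0}
--     return max(available, key=lambda s: (len(by_source[s]), pref.get(s, -5)))
-- ===== Notes on version B (the rewrite author's own statement) =====
-- stated objective: idiomatic
-- what changed: Replaces A's three passes (max count, collect tie candidates, scan the preference list) with a single max() over available using a lexicographic key (record count, preference rank from a dict with sentinel -5), relying on max returning the first maximal element to reproduce the cand[0] fallback.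
import Mathlib
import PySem

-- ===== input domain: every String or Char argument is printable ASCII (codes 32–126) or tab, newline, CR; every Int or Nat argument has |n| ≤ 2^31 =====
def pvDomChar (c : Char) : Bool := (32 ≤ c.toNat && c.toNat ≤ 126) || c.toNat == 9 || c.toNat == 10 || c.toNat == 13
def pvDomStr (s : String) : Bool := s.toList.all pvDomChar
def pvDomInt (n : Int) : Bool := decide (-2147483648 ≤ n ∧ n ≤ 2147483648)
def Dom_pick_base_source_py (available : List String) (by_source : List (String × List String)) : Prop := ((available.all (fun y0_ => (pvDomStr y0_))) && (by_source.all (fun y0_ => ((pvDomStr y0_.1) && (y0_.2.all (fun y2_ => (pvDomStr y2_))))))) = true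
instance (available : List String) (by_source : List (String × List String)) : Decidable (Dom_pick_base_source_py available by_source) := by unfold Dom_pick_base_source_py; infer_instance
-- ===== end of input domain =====

-- B replaces A's three passes (max count, collect tie candidates, scan the preference list)
-- by one max() over `available` with the lexicographic key (record count, preference rank).

-- shared helper: len(by_source[s]) — first-match dict lookup; a missing key (KeyError) is excluded by Pre_
def pvCnt (by_source : List (String × List String)) (s : String) : Int :=
  (((PySem.Dict.mk by_source).get? s).getD []).length

-- ===== PORT A =====
def pick_base_source_py (available : List String) (by_source : List (String × List String)) : String :=
  -- best_n = max(len(by_source[s]) for s in available)    (max() of an empty sequence raises: excluded by Pre_)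
  let best_n : Int := (PySem.List.max? (available.map (fun s => pvCnt by_source s)) (fun x => x)).getD 0
  -- cand = [s for s in available if len(by_source[s]) == best_n]
  let cand : List String := available.filter (fun s => pvCnt by_source s == best_n)
  let tie_pref : List String := ["Travel.com.vn", "Trip.com", "Mytour.vn", "iVIVU", "Agoda"]
  -- for o in tie_pref: if o in cand: return o
  match tie_pref.find? (fun o => cand.contains o) with
  | some o => o
  | none => (PySem.List.pyGet? cand 0).getD ""   -- return cand[0]  (cand is nonempty whenever available is)

-- ===== PORT B =====
-- pref = {"Travel.com.vn": 4, "Trip.com": 3, "Mytour.vn": 2, "iVIVU": 1, "Agoda": 0}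
def pvPref : PySem.Dict String Int :=
  PySem.Dict.mk [("Travel.com.vn", 4), ("Trip.com", 3), ("Mytour.vn", 2), ("iVIVU", 1), ("Agoda", 0)]

-- pref.get(s, -5)
def pvPrefScore (s : String) : Int := pvPref.getD s (-5)

def pick_base_source_py_alt (available : List String) (by_source : List (String × List String)) : String :=
  -- return max(available, key=lambda s: (len(by_source[s]), pref.get(s, -5)))
  (PySem.List.max2? available (fun s => pvCnt by_source s) (fun s => pvPrefScore s)).getD ""

-- ===== PRECONDITION & SPEC =====
-- Pre_ excludes exactly the inputs on which the Python raises: empty `available` (ValueError from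
-- max()) and an s in `available` missing from by_source (KeyError).
def Pre_pick_base_source_py (available : List String) (by_source : List (String × List String)) : Prop :=
  available ≠ [] ∧ ∀ s ∈ available, s ∈ by_source.map Prod.fst
instance (available : List String) (by_source : List (String × List String)) : Decidable (Pre_pick_base_source_py available by_source) := by unfold Pre_pick_base_source_py; infer_instance

def pvWitness_pick_base_source_py : List String × (List (String × List String)) :=
  (["Agoda", "x"], [("Agoda", ["r1"]), ("x", ["r1", "r2"])])

def Spec_pick_base_source_py (available : List String) (by_source : List (String × List String)) (out : String) : Prop := out = pick_base_source_py_alt available by_source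
instance (available : List String) (by_source : List (String × List String)) (out : String) : Decidable (Spec_pick_base_source_py available by_source out) := by unfold Spec_pick_base_source_py; infer_instance

-- ===== CLAIM (what is proved, stated in full; the proofs are below) =====
def Claim_equal_pick_base_source_py : Prop := ∀ (available : List String) (by_source : List (String × List String)), Dom_pick_base_source_py available by_source → Pre_pick_base_source_py available by_source → Spec_pick_base_source_py available by_source (pick_base_source_py available by_source)

-- ===== LEMMAS AND PROOFS =====

-- the preference score of every string, in closed form
theorem prefScore_eq (s : String) : pvPrefScore s =
    if "Travel.com.vn" = s then 4 else if "Trip.com" = s then 3 else if "Mytour.vn" = s then 2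
    else if "iVIVU" = s then 1 else if "Agoda" = s then 0 else -5 := by
  simp [pvPrefScore, pvPref, PySem.Dict.getD_eq_get?_getD, PySem.Dict.get?_mk_cons]
  split_ifs <;> rfl

theorem find?_congr_mem {α : Type} {p q : α → Bool} (l : List α) (h : ∀ y ∈ l, p y = q y) :
    l.find? p = l.find? q := by
  induction l with
  | nil => rfl
  | cons x t ih =>
    have hx := h x (List.mem_cons_self)
    by_cases hp : p x = true
    · rw [List.find?_cons_of_pos hp, List.find?_cons_of_pos (hx ▸ hp)]
    · rw [List.find?_cons_of_neg (by simpa using hp),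
        List.find?_cons_of_neg (by simp [← hx]; simpa using hp)]
      exact ih (fun y hy => h y (List.mem_cons_of_mem _ hy))

-- unfolding equations for the max2? loop
theorem max2?_singleton (k1 k2 : String → Int) (m : String) :
    PySem.List.max2? [m] k1 k2 = some m := by
  simp [PySem.List.max2?]

theorem max2?_cons_cons (k1 k2 : String → Int) (m x : String) (t : List String) :
    PySem.List.max2? (m :: x :: t) k1 k2 =
      PySem.List.max2? ((if k1 m < k1 x ∨ (k1 m ≤ k1 x ∧ k2 m < k2 x) then x else m) :: t) k1 k2 := by
  by_cases hC : k1 m < k1 x ∨ (k1 m ≤ k1 x ∧ k2 m < k2 x)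
  · simp [PySem.List.max2?, hC]
  · simp [PySem.List.max2?, hC]

-- characterization of max2? on a nonempty list: the result is the first element
-- whose (k1, k2) key is lexicographically maximal
theorem max2?_char (k1 k2 : String → Int) (t : List String) : ∀ m : String,
    ∃ r, PySem.List.max2? (m :: t) k1 k2 = some r ∧
      r ∈ m :: t ∧
      (∀ y ∈ m :: t, k1 y < k1 r ∨ (k1 y = k1 r ∧ k2 y ≤ k2 r)) ∧
      (m :: t).find? (fun y => decide (k1 y = k1 r ∧ k2 y = k2 r)) = some r := by
  induction t with
  | nil =>
    intro m
    refine ⟨m, max2?_singleton k1 k2 m, List.mem_cons_self, ?_, ?_⟩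
    · intro y hy; simp at hy; subst hy; right; exact ⟨rfl, le_refl _⟩
    · simp [List.find?]
  | cons x t ih =>
    intro m
    rw [max2?_cons_cons]
    by_cases hC : k1 m < k1 x ∨ (k1 m ≤ k1 x ∧ k2 m < k2 x)
    · -- replace: the running maximum becomes x
      rw [if_pos hC]
      obtain ⟨r, hfold, hmem, hmax, hfind⟩ := ih x
      have hxr := hmax x List.mem_cons_self
      refine ⟨r, hfold, List.mem_cons_of_mem _ hmem, ?_, ?_⟩
      · intro y hy
        rcases List.mem_cons.mp hy with hy | hy
        · subst hy; rcases hC with h | ⟨h1, h2⟩ <;> rcases hxr with h' | ⟨h1', h2'⟩ <;> omega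
        · exact hmax y hy
      · have hmr : ¬ (k1 m = k1 r ∧ k2 m = k2 r) := by
          rintro ⟨e1, e2⟩
          rcases hC with h | ⟨h1, h2⟩ <;> rcases hxr with h' | ⟨h1', h2'⟩ <;> omega
        rw [List.find?_cons_of_neg (by simpa using hmr)]
        exact hfind
    · -- keep: the running maximum stays m
      rw [if_neg hC]
      push Not at hC
      obtain ⟨hC1, hC2⟩ := hC
      obtain ⟨r, hfold, hmem, hmax, hfind⟩ := ih m
      have hmr := hmax m List.mem_cons_self
      have hxle : k1 x < k1 m ∨ (k1 x = k1 m ∧ k2 x ≤ k2 m) := by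
        by_cases h : k1 x < k1 m
        · left; exact h
        · right; have := hC2 (by omega); omega
      refine ⟨r, hfold, ?_, ?_, ?_⟩
      · rcases List.mem_cons.mp hmem with h | h
        · subst h; exact List.mem_cons_self
        · exact List.mem_cons_of_mem _ (List.mem_cons_of_mem _ h)
      · intro y hy
        rcases List.mem_cons.mp hy with hy | hy
        · subst hy; exact hmax y List.mem_cons_self
        rcases List.mem_cons.mp hy with hy | hy
        · subst hy; rcases hxle with h | ⟨h1, h2⟩ <;> rcases hmr with h' | ⟨h1', h2'⟩ <;> omega
        · exact hmax y (List.mem_cons_of_mem _ hy)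
      · by_cases hpm : (k1 m = k1 r ∧ k2 m = k2 r)
        · have hh : (m :: t).find? (fun y => decide (k1 y = k1 r ∧ k2 y = k2 r)) = some m := by
            rw [List.find?_cons_of_pos (by simpa using hpm)]
          rw [hh] at hfind
          have hrm : m = r := by injection hfind
          rw [List.find?_cons_of_pos (by simpa using hpm), hrm]
        · rw [List.find?_cons_of_neg (by simpa using hpm)]
          rw [List.find?_cons_of_neg (by simpa using hpm)] at hfind
          have hpx : ¬ (k1 x = k1 r ∧ k2 x = k2 r) := by
            rintro ⟨e1, e2⟩
            rcases hxle with h | ⟨h1, h2⟩ <;> rcases hmr with h' | ⟨h1', h2'⟩ <;>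
              exact hpm (by constructor <;> omega)
          rw [List.find?_cons_of_neg (by simpa using hpx)]
          exact hfind

-- if find? finds b in l1 ++ l2 and some element of l1 satisfies p, then b lies in l1
theorem find?_mem_prefix {α : Type} {p : α → Bool} {l1 l2 : List α} {b a : α}
    (h : (l1 ++ l2).find? p = some b) (ha : a ∈ l1) (hpa : p a = true) : b ∈ l1 := by
  induction l1 with
  | nil => simp at ha
  | cons x t ih =>
    by_cases hx : p x = true
    · rw [List.cons_append, List.find?_cons_of_pos hx] at h
      injection h with h; subst h; exact List.mem_cons_self
    · rcases List.mem_cons.mp ha with ha | ha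
      · subst ha; exact absurd hpa hx
      · rw [List.cons_append, List.find?_cons_of_neg (by simpa using hx)] at h
        exact List.mem_cons_of_mem _ (ih h ha)

-- A's three passes return the first element with lexicographically maximal (count, preference) key
theorem pickA_eq (by_source : List (String × List String)) (a : String) (t : List String) (r : String)
    (hmem : r ∈ a :: t)
    (hmax : ∀ y ∈ a :: t, pvCnt by_source y < pvCnt by_source r ∨
      (pvCnt by_source y = pvCnt by_source r ∧ pvPrefScore y ≤ pvPrefScore r))
    (hfind : (a :: t).find?
      (fun y => decide (pvCnt by_source y = pvCnt by_source r ∧ pvPrefScore y = pvPrefScore r)) = some r) :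
    pick_base_source_py (a :: t) by_source = r := by
  have hbest : (PySem.List.max? ((a :: t).map (fun s => pvCnt by_source s)) (fun x => x)).getD 0
      = pvCnt by_source r := by
    rw [List.map_cons, PySem.List.max?_id_cons]
    obtain ⟨hinit, hub⟩ := PySem.List.le_foldl_max (t.map (fun s => pvCnt by_source s)) (pvCnt by_source a)
    have hmm := PySem.List.foldl_max_mem (t.map (fun s => pvCnt by_source s)) (pvCnt by_source a)
    have h1 : List.foldl max (pvCnt by_source a) (t.map (fun s => pvCnt by_source s)) ≤ pvCnt by_source r := by
      rcases hmm with h | h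
      · rw [h]; rcases hmax a List.mem_cons_self with h' | ⟨h', _⟩ <;> omega
      · obtain ⟨s, hs, hval⟩ := List.mem_map.mp h
        rw [← hval]
        rcases hmax s (List.mem_cons_of_mem _ hs) with h' | ⟨h', _⟩ <;> omega
    have h2 : pvCnt by_source r ≤ List.foldl max (pvCnt by_source a) (t.map (fun s => pvCnt by_source s)) := by
      rcases List.mem_cons.mp hmem with h | h
      · subst h; exact hinit
      · exact hub _ (List.mem_map.mpr ⟨r, h, rfl⟩)
    simp
    omega
  simp only [pick_base_source_py, hbest]
  have hrcand : r ∈ (a :: t).filter (fun s => pvCnt by_source s == pvCnt by_source r) :=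
    List.mem_filter.mpr ⟨hmem, by simp⟩
  cases hfd : List.find?
      (fun o => ((a :: t).filter (fun s => pvCnt by_source s == pvCnt by_source r)).contains o)
      ["Travel.com.vn", "Trip.com", "Mytour.vn", "iVIVU", "Agoda"] with
  | none =>
    show (PySem.List.pyGet? ((a :: t).filter (fun s => pvCnt by_source s == pvCnt by_source r)) 0).getD "" = r
    have hnone := List.find?_eq_none.mp hfd
    -- no preferred name is a candidate, so every candidate (r included) has score -5
    have hk2 : ∀ y ∈ (a :: t).filter (fun s => pvCnt by_source s == pvCnt by_source r),
        pvPrefScore y = -5 := by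
      intro y hyc
      rw [prefScore_eq y]
      split_ifs with h1 h2 h3 h4 h5
      · exfalso; subst h1; exact hnone _ (by simp) (List.contains_iff_mem.mpr hyc)
      · exfalso; subst h2; exact hnone _ (by simp) (List.contains_iff_mem.mpr hyc)
      · exfalso; subst h3; exact hnone _ (by simp) (List.contains_iff_mem.mpr hyc)
      · exfalso; subst h4; exact hnone _ (by simp) (List.contains_iff_mem.mpr hyc)
      · exfalso; subst h5; exact hnone _ (by simp) (List.contains_iff_mem.mpr hyc)
      · rfl
    have hpeq : ∀ y ∈ a :: t, (pvCnt by_source y == pvCnt by_source r)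
        = decide (pvCnt by_source y = pvCnt by_source r ∧ pvPrefScore y = pvPrefScore r) := by
      intro y hy
      by_cases h : pvCnt by_source y = pvCnt by_source r
      · have hyc : y ∈ (a :: t).filter (fun s => pvCnt by_source s == pvCnt by_source r) :=
          List.mem_filter.mpr ⟨hy, by simp [h]⟩
        simp [h, hk2 y hyc, hk2 r hrcand]
      · simp [h]
    have hhead : ((a :: t).filter (fun s => pvCnt by_source s == pvCnt by_source r)).head? = some r := by
      rw [List.head?_filter, find?_congr_mem _ hpeq, hfind]
    obtain ⟨rest, hco⟩ : ∃ rest,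
        (a :: t).filter (fun s => pvCnt by_source s == pvCnt by_source r) = r :: rest := by
      cases hc : (a :: t).filter (fun s => pvCnt by_source s == pvCnt by_source r) with
      | nil => rw [hc] at hhead; simp at hhead
      | cons c cs => rw [hc] at hhead; simp at hhead; exact ⟨cs, by rw [hhead]⟩
    rw [hco]
    simp [PySem.List.pyGet?, PySem.List.pyIdx?]
  | some o =>
    show o = r
    have hoc : o ∈ (a :: t).filter (fun s => pvCnt by_source s == pvCnt by_source r) :=
      List.contains_iff_mem.mp (List.find?_some hfd)
    obtain ⟨hot, hko⟩ := List.mem_filter.mp hoc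
    have hk2o : pvPrefScore o ≤ pvPrefScore r := by
      rcases hmax o hot with h | ⟨_, h⟩
      · exfalso; simp at hko; omega
      · exact h
    have hk2o0 : 0 ≤ pvPrefScore o := by
      have hom := List.mem_of_find?_eq_some hfd
      simp at hom
      rcases hom with rfl | rfl | rfl | rfl | rfl <;> simp [prefScore_eq]
    have hr0 : 0 ≤ pvPrefScore r := le_trans hk2o0 hk2o
    have hrid : r = "Travel.com.vn" ∨ r = "Trip.com" ∨ r = "Mytour.vn" ∨ r = "iVIVU" ∨ r = "Agoda" := by
      have hps := prefScore_eq r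
      split_ifs at hps with h1 h2 h3 h4 h5
      · exact Or.inl h1.symm
      · exact Or.inr (Or.inl h2.symm)
      · exact Or.inr (Or.inr (Or.inl h3.symm))
      · exact Or.inr (Or.inr (Or.inr (Or.inl h4.symm)))
      · exact Or.inr (Or.inr (Or.inr (Or.inr h5.symm)))
      · exfalso; omega
    rcases hrid with rfl | rfl | rfl | rfl | rfl
    · have hol1 := find?_mem_prefix (l1 := ["Travel.com.vn"])
        (l2 := ["Trip.com", "Mytour.vn", "iVIVU", "Agoda"]) (by exact hfd) (by simp)
        (List.contains_iff_mem.mpr hrcand)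
      simp at hol1
      exact hol1
    · have hol1 := find?_mem_prefix (l1 := ["Travel.com.vn", "Trip.com"])
        (l2 := ["Mytour.vn", "iVIVU", "Agoda"]) (by exact hfd) (by simp)
        (List.contains_iff_mem.mpr hrcand)
      simp at hol1
      rcases hol1 with rfl | rfl <;> simp [prefScore_eq] at hk2o ⊢
    · have hol1 := find?_mem_prefix (l1 := ["Travel.com.vn", "Trip.com", "Mytour.vn"])
        (l2 := ["iVIVU", "Agoda"]) (by exact hfd) (by simp)
        (List.contains_iff_mem.mpr hrcand)
      simp at hol1
      rcases hol1 with rfl | rfl | rfl <;> simp [prefScore_eq] at hk2o ⊢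
    · have hol1 := find?_mem_prefix (l1 := ["Travel.com.vn", "Trip.com", "Mytour.vn", "iVIVU"])
        (l2 := ["Agoda"]) (by exact hfd) (by simp)
        (List.contains_iff_mem.mpr hrcand)
      simp at hol1
      rcases hol1 with rfl | rfl | rfl | rfl <;> simp [prefScore_eq] at hk2o ⊢
    · have hol1 := find?_mem_prefix (l1 := ["Travel.com.vn", "Trip.com", "Mytour.vn", "iVIVU", "Agoda"])
        (l2 := []) (by exact hfd) (by simp)
        (List.contains_iff_mem.mpr hrcand)
      simp at hol1
      rcases hol1 with rfl | rfl | rfl | rfl | rfl <;> simp [prefScore_eq] at hk2o ⊢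

-- ===== VERDICT (by name: the statement is the Claim_ definition above) =====
theorem pick_base_source_py_spec : Claim_equal_pick_base_source_py := by
  intro available by_source _hdom hpre
  obtain ⟨hne, _hkeys⟩ := hpre
  unfold Spec_pick_base_source_py
  cases available with
  | nil => exact absurd rfl hne
  | cons a t =>
  obtain ⟨r, hB, hmem, hmax, hfind⟩ :=
    max2?_char (fun s => pvCnt by_source s) (fun s => pvPrefScore s) t a
  have hBval : pick_base_source_py_alt (a :: t) by_source = r := by
    unfold pick_base_source_py_alt; rw [hB]; rfl
  rw [hBval]
  exact pickA_eq by_source a t r hmem hmax hfind
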